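-- pv_equiv track=rewrite | github.com/SahilPatil-Dev/100-Days-Of-Advanced-Python | Day-29/log_analytics.py | naive_count
-- ===== SOURCE A (Python) =====
-- def naive_count(logs):
--     result = {}
--     for user, action in logs:
--         if user not in result:
--             result[user] = {}
--         if action not in result[user]:
--             result[user][action] = 0
--         result[user][action] += 1
--     return result
-- ===== SOURCE B (Python) =====
-- def naive_count(logs):
--     grouped = {}
--     for user, action in logs:
--         grouped.setdefault(user, []).append(action)
--     return {user: {a: actions.count(a) for a in dict.fromkeys(actions)}
--             for user, actions in grouped.items()}
-- ===== Notes on version B (the rewrite author's own statement) =====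
-- stated objective: alternative
-- what changed: B first groups actions per user into lists in one pass, then builds each user's counts separately via an ordered-dedup comprehension with list.count, instead of A's single pass maintaining nested count dicts.
import Mathlib
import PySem

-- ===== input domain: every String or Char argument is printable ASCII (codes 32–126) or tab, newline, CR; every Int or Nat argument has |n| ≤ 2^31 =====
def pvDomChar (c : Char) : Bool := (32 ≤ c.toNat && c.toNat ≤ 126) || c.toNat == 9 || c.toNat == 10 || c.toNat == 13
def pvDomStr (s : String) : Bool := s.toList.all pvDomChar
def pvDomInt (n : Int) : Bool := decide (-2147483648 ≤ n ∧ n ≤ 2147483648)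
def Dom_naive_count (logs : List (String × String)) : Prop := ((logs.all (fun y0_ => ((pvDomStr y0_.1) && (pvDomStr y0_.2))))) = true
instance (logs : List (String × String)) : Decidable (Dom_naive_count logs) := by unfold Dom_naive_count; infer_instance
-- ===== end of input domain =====

-- B groups actions per user into lists first, then counts each list separately (ordered dedup + count), instead of A's single pass over nested count dicts; alternative decomposition, same return value.


-- ===== PORT A =====
-- one iteration of A's loop body: ensure result[user] exists, ensure result[user][action] exists, then result[user][action] += 1
def pvStepA (d : PySem.Dict String (PySem.Dict String Int)) (p : String × String) :
    PySem.Dict String (PySem.Dict String Int) :=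
  let d1 := if d.contains p.1 then d else d.insert p.1 PySem.Dict.empty
  let inner := d1.getD p.1 PySem.Dict.empty
  let inner1 := if inner.contains p.2 then inner else inner.insert p.2 0
  d1.insert p.1 (inner1.modify p.2 0 (· + 1))

def naive_count (logs : List (String × String)) : List (String × List (String × Int)) :=
  ((logs.foldl pvStepA PySem.Dict.empty).items).map (fun q => (q.1, q.2.items))

-- ===== PORT B =====
-- grouped.setdefault(user, []).append(action)
def pvStepB (g : PySem.Dict String (List String)) (p : String × String) :
    PySem.Dict String (List String) :=
  g.modify p.1 [] (· ++ [p.2])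

def naive_count_alt (logs : List (String × String)) : List (String × List (String × Int)) :=
  let grouped := logs.foldl pvStepB PySem.Dict.empty
  grouped.items.map (fun q =>
    (q.1, (PySem.List.dedup q.2).map (fun a => (a, (q.2.count a : Int)))))

-- ===== PRECONDITION & SPEC =====
def Spec_naive_count (logs : List (String × String)) (out : List (String × List (String × Int))) : Prop := out = naive_count_alt logs
instance (logs : List (String × String)) (out : List (String × List (String × Int))) : Decidable (Spec_naive_count logs out) := by unfold Spec_naive_count; infer_instance

-- ===== CLAIM (what is proved, stated in full; the proofs are below) =====
def Claim_equal_naive_count : Prop := ∀ (logs : List (String × String)), Dom_naive_count logs → Spec_naive_count logs (naive_count logs)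

-- ===== LEMMAS AND PROOFS =====

-- Φ turns a grouping dict into A's nested count dict, key by key.
def pvPhi (g : PySem.Dict String (List String)) : PySem.Dict String (PySem.Dict String Int) :=
  PySem.Dict.mk (g.items.map (fun q => (q.1, PySem.Dict.counter q.2)))

theorem pvPhi_contains (g : PySem.Dict String (List String)) (k : String) :
    (pvPhi g).contains k = g.contains k := by
  simp only [pvPhi, PySem.Dict.contains, List.any_map]
  rfl

theorem pvPhi_get? (g : PySem.Dict String (List String)) (k : String) :
    (pvPhi g).get? k = (g.get? k).map PySem.Dict.counter := by
  simp only [pvPhi, PySem.Dict.get?, List.find?_map, Option.map_map]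
  rfl

theorem pvPhi_getD (g : PySem.Dict String (List String)) (k : String) :
    (pvPhi g).getD k PySem.Dict.empty = PySem.Dict.counter (g.getD k []) := by
  simp only [PySem.Dict.getD, pvPhi_get?]
  cases g.get? k <;> rfl

theorem pvPhi_insert (g : PySem.Dict String (List String)) (k : String) (v : List String) :
    (pvPhi g).insert k (PySem.Dict.counter v) = pvPhi (g.insert k v) := by
  simp only [PySem.Dict.insert, pvPhi_contains]
  by_cases hc : g.contains k = true
  · simp only [hc, if_true, pvPhi, List.map_map]
    congr 1
    apply List.map_congr_left
    intro q _
    by_cases hq : (q.1 == k) = true <;> simp [hq, Function.comp]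
  · simp [hc, pvPhi]

-- the "ensure the key exists, then increment" pattern is one modify
theorem pvIncr (c : PySem.Dict String Int) (a : String) :
    (if c.contains a then c else c.insert a 0).modify a 0 (· + 1) = c.modify a 0 (· + 1) := by
  by_cases ha : c.contains a = true
  · simp [ha]
  · simp only [ha, Bool.false_eq_true, if_false, PySem.Dict.modify,
      PySem.Dict.getD_insert_self, PySem.Dict.insert_insert_self,
      PySem.Dict.getD_of_not_contains c 0 (by simpa using ha)]

-- one step of A starting from Φ g equals Φ of one step of B
theorem pvStep_comm (g : PySem.Dict String (List String)) (p : String × String) :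
    pvStepA (pvPhi g) p = pvPhi (pvStepB g p) := by
  by_cases hc : g.contains p.1 = true
  · simp only [pvStepA, pvStepB, pvPhi_contains, hc, if_true, pvPhi_getD]
    rw [pvIncr, show (PySem.Dict.counter (g.getD p.1 [])).modify p.2 0 (· + 1)
        = PySem.Dict.counter (g.getD p.1 [] ++ [p.2])
        from (PySem.Dict.counter_append_singleton _ _).symm, pvPhi_insert]
    rfl
  · have hc' : g.contains p.1 = false := by simpa using hc
    simp only [pvStepA, pvStepB, pvPhi_contains, hc', Bool.false_eq_true, if_false]
    rw [show (pvPhi g).insert p.1 PySem.Dict.empty = pvPhi (g.insert p.1 [])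
        from pvPhi_insert g p.1 [], pvPhi_getD, PySem.Dict.getD_insert_self, pvIncr,
      show (PySem.Dict.counter ([] : List String)).modify p.2 0 (· + 1)
        = PySem.Dict.counter [p.2]
        from (PySem.Dict.counter_append_singleton [] p.2).symm,
      pvPhi_insert, PySem.Dict.insert_insert_self,
      show g.modify p.1 [] (· ++ [p.2]) = g.insert p.1 (g.getD p.1 [] ++ [p.2]) from rfl,
      PySem.Dict.getD_of_not_contains g [] hc']
    rfl

theorem pvFold_comm (logs : List (String × String)) (g : PySem.Dict String (List String)) :
    logs.foldl pvStepA (pvPhi g) = pvPhi (logs.foldl pvStepB g) := by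
  induction logs generalizing g with
  | nil => rfl
  | cons p rest ih => simp only [List.foldl_cons, pvStep_comm, ih]

-- ===== VERDICT (by name: the statement is the Claim_ definition above) =====
theorem naive_count_spec : Claim_equal_naive_count := by
  intro logs _
  unfold Spec_naive_count naive_count naive_count_alt
  have h0 : (PySem.Dict.empty : PySem.Dict String (PySem.Dict String Int))
      = pvPhi PySem.Dict.empty := rfl
  rw [h0, pvFold_comm]
  simp only [pvPhi, List.map_map]
  apply List.map_congr_left
  intro q _
  simp [Function.comp, PySem.Dict.items_counter, PySem.List.dedup_eq_ofList]
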